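-- pv_equiv track=rewrite | github.com/sharmasourab93/CodeDaily | ProblemSolving/Cupcake.py | marcsCakewalk
-- ===== SOURCE A (Python) =====
-- def next_max_calorie(arr):
--     while True and len(arr)!=0:
--         m=max(arr)
--         arr.remove(m)
--         yield m
--
-- def marcsCakewalk(calorie):
--     calorie_arr=calorie
--     mile=0
--     j=0
--     for i in next_max_calorie(calorie_arr):
--         mile+=((2**j)*i)
--         j+=1
--     return mile
-- ===== SOURCE B (Python) =====
-- # B: sort descending once, then one accumulating pass (O(n log n) vs A's repeated max+remove O(n^2)).
-- # Note: A empties its argument list in place via arr.remove; B does not mutate it (return value is the same).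
-- def marcsCakewalk(calorie):
--     mile = 0
--     j = 0
--     for c in sorted(calorie, reverse=True):
--         mile += (2 ** j) * c
--         j += 1
--     return mile
-- ===== Notes on version B (the rewrite author's own statement) =====
-- stated objective: faster
-- what changed: Replaced the generator that repeatedly takes max(arr) and removes it (quadratic) by a single descending sort followed by one accumulating pass.
import Mathlib
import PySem

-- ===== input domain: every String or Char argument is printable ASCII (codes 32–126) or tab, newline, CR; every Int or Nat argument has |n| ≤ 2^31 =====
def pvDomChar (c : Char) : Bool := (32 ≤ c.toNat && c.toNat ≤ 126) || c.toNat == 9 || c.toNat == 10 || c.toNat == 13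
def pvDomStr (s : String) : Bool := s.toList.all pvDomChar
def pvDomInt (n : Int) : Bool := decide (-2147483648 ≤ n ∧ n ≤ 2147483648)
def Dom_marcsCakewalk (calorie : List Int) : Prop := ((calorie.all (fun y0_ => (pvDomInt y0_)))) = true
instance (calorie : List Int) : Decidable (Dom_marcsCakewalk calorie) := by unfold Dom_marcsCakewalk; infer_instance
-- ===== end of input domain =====

-- B replaces A's repeated max-and-remove loop by one descending sort plus a single pass (asymptotically
-- faster); A empties its argument list in place, B does not mutate it — the equivalence is about the return value.

-- ===== PORT A =====
-- Generator next_max_calorie fused with the consuming for-loop: while arr nonempty, take max, remove it,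
-- accumulate 2^j * m.  The `none` match arms are unreachable (arr ≠ [] gives a max, and max ∈ arr).
def marcsCakewalkLoopA (arr : List Int) (mile : Int) (j : Nat) : Int :=
  if arr.length ≠ 0 then
    match hm : PySem.List.max? arr (fun x => x) with
    | none => mile
    | some m =>
      match hr : PySem.List.remove? arr m with
      | none => mile
      | some arr' => marcsCakewalkLoopA arr' (mile + 2 ^ j * m) (j + 1)
  else mile
termination_by arr.length
decreasing_by
  have hmem : m ∈ arr := PySem.List.max?_mem hm
  rw [PySem.List.remove?_eq_some_erase arr m hmem] at hr
  cases hr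
  have h1 := List.length_erase_of_mem hmem
  have h2 : 0 < arr.length := List.length_pos_of_mem hmem
  omega

def marcsCakewalk (calorie : List Int) : Int :=
  marcsCakewalkLoopA calorie 0 0

-- ===== PORT B =====
-- for c in sorted(calorie, reverse=True): mile += 2^j * c; j += 1
def marcsCakewalkLoopB (l : List Int) (mile : Int) (j : Nat) : Int :=
  match l with
  | [] => mile
  | c :: rest => marcsCakewalkLoopB rest (mile + 2 ^ j * c) (j + 1)

def marcsCakewalk_alt (calorie : List Int) : Int :=
  marcsCakewalkLoopB (PySem.List.sorted calorie (fun x => x) true) 0 0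

-- ===== PRECONDITION & SPEC =====
def Spec_marcsCakewalk (calorie : List Int) (out : Int) : Prop := out = marcsCakewalk_alt calorie
instance (calorie : List Int) (out : Int) : Decidable (Spec_marcsCakewalk calorie out) := by unfold Spec_marcsCakewalk; infer_instance

-- ===== CLAIM (what is proved, stated in full; the proofs are below) =====
def Claim_equal_marcsCakewalk : Prop := ∀ (calorie : List Int), Dom_marcsCakewalk calorie → Spec_marcsCakewalk calorie (marcsCakewalk calorie)

-- ===== LEMMAS AND PROOFS =====

-- Peeling the first maximum off a list is the head step of its descending sort.
lemma sortedDesc_cons_erase (arr : List Int) (m : Int)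
    (hm : PySem.List.max? arr (fun x => x) = some m) :
    PySem.List.sorted arr (fun x => x) true = m :: PySem.List.sorted (arr.erase m) (fun x => x) true := by
  have hmem : m ∈ arr := PySem.List.max?_mem hm
  have hmax : ∀ y ∈ arr, y ≤ m := by
    intro y hy; exact PySem.List.max?_isMax hm y hy
  have hperm : (PySem.List.sorted arr (fun x => x) true).Perm
      (m :: PySem.List.sorted (arr.erase m) (fun x => x) true) := by
    refine (PySem.List.sorted_perm arr (fun x => x) true).trans ?_
    refine (List.perm_cons_erase hmem).trans ?_
    exact ((PySem.List.sorted_perm (arr.erase m) (fun x => x) true).cons m).symm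
  refine List.Perm.eq_of_pairwise (le := fun a b : Int => b ≤ a) ?_ ?_ ?_ hperm
  · intro a b _ _ h1 h2; exact le_antisymm h2 h1
  · exact PySem.List.sorted_pairwise_rev arr (fun x => x)
  · refine List.Pairwise.cons ?_ (PySem.List.sorted_pairwise_rev (arr.erase m) (fun x => x))
    intro y hy
    have : y ∈ arr.erase m := (PySem.List.mem_sorted _ _ _ _).mp hy
    exact hmax y (List.mem_of_mem_erase this)

lemma loopA_eq_loopB (n : Nat) (arr : List Int) (mile : Int) (j : Nat) (hlen : arr.length ≤ n) :
    marcsCakewalkLoopA arr mile j = marcsCakewalkLoopB (PySem.List.sorted arr (fun x => x) true) mile j := by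
  induction n generalizing arr mile j with
  | zero =>
    have : arr = [] := List.length_eq_zero_iff.mp (Nat.le_zero.mp hlen)
    subst this
    rw [marcsCakewalkLoopA, if_neg (by simp),
      (PySem.List.sorted_eq_nil_iff ([] : List Int) (fun x => x) true).mpr rfl,
      marcsCakewalkLoopB]
  | succ n ih =>
    by_cases hnil : arr = []
    · subst hnil
      rw [marcsCakewalkLoopA, if_neg (by simp),
      (PySem.List.sorted_eq_nil_iff ([] : List Int) (fun x => x) true).mpr rfl,
      marcsCakewalkLoopB]
    · rw [marcsCakewalkLoopA]
      rw [if_pos (by simpa using List.length_pos_of_ne_nil hnil |>.ne')]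
      split
      · rename_i hm
        exact absurd ((PySem.List.max?_eq_none_iff _ _).mp hm) hnil
      · rename_i m hm
        have hmem : m ∈ arr := PySem.List.max?_mem hm
        split
        · rename_i hr
          rw [PySem.List.remove?_eq_some_erase arr m hmem] at hr
          exact absurd hr (by simp)
        · rename_i arr' hr
          rw [PySem.List.remove?_eq_some_erase arr m hmem] at hr
          cases hr
          rw [sortedDesc_cons_erase arr m hm, marcsCakewalkLoopB]
          exact ih (arr.erase m) _ _ (by
            have := List.length_erase_of_mem hmem
            have := List.length_pos_of_mem hmem
            omega)

-- ===== VERDICT (by name: the statement is the Claim_ definition above) =====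
theorem marcsCakewalk_spec : Claim_equal_marcsCakewalk := by
  intro calorie _
  unfold Spec_marcsCakewalk marcsCakewalk marcsCakewalk_alt
  exact loopA_eq_loopB calorie.length calorie 0 0 le_rfl
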